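-- pv_equiv track=rewrite | github.com/tullhao/cs2-python-gsi-bridge-v3 | cs2_gsi_bridge_py/app/main.py | sanitize_topic_part
-- ===== SOURCE A (Python) =====
-- def sanitize_topic_part(value: str) -> str:
--     out = []
--     for ch in value.lower():
--         if ch.isalnum() or ch in ["_", "-"]:
--             out.append(ch)
--         else:
--             out.append("_")
--     s = "".join(out)
--     while "__" in s:
--         s = s.replace("__", "_")
--     return s.strip("_")
-- ===== SOURCE B (Python) =====
-- _SANITIZE_TABLE = str.maketrans({
--     i: (chr(i) if chr(i).isalnum() or chr(i) in "_-" else "_")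
--     for i in range(128)
-- })
--
-- def sanitize_topic_part(value: str) -> str:
--     mapped = value.lower().translate(_SANITIZE_TABLE)
--     return "_".join(part for part in mapped.split("_") if part)
-- ===== Notes on version B (the rewrite author's own statement) =====
-- stated objective: faster
-- what changed: Replaces the per-character Python loop plus repeated whole-string double-underscore replace passes with bulk C-level operations: a precomputed translate table maps the characters, and splitting on underscores, filtering empty parts and rejoining collapses underscore runs and strips the ends in one step.
import Mathlib
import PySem

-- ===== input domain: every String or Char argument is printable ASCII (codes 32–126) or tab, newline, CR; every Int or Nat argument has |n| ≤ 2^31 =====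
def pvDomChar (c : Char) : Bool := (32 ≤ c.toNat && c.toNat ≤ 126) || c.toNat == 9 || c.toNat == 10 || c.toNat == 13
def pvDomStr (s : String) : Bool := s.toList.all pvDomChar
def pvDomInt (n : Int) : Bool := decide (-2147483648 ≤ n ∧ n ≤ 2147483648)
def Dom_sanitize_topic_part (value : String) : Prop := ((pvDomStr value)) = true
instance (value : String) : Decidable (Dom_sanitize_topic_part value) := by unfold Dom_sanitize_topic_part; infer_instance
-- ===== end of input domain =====

-- B maps the characters through a precomputed translate table and collapses/strips the
-- underscores with split/filter/join (bulk operations) instead of A's per-character loop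
-- and repeated double-underscore replace passes; return values proved equal on the domain.

-- ===== PORT A =====
-- repU characterises one pass of A's replace step; needed to prove the while-loop terminates.
def repU : List Char → List Char
  | [] => []
  | [c] => [c]
  | c :: d :: t => if c = '_' ∧ d = '_' then '_' :: repU t else c :: repU (d :: t)

theorem replace_go_eq (fuel : Nat) : ∀ (l acc : List Char), l.length ≤ fuel →
    PySem.Chars.replace.go ['_', '_'] ['_'] fuel l acc = acc.reverse ++ repU l := by
  induction fuel with
  | zero =>
    intro l acc h
    have : l = [] := by cases l <;> simp_all
    subst this; simp [PySem.Chars.replace.go, repU]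
  | succ n ih =>
    intro l acc h
    match l with
    | [] => simp [PySem.Chars.replace.go, repU]
    | [c] =>
      rw [PySem.Chars.replace.go]
      simp [List.isPrefixOf, repU, ih [] (c :: acc) (by simp)]
    | c :: d :: t =>
      by_cases hc : c = '_' ∧ d = '_'
      · obtain ⟨hc1, hc2⟩ := hc; subst hc1; subst hc2
        rw [PySem.Chars.replace.go]
        simp only [List.isPrefixOf, beq_self_eq_true, Bool.and_self, if_pos]
        rw [show List.drop ['_', '_'].length ('_' :: '_' :: t) = t from rfl,
          show (['_'] : List Char).reverse ++ acc = '_' :: acc from rfl]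
        rw [ih t ('_' :: acc) (by simp at h ⊢; omega)]
        simp [repU]
      · rw [PySem.Chars.replace.go]
        have hpre : ['_', '_'].isPrefixOf (c :: d :: t) = false := by
          simp [List.isPrefixOf]
          intro h1 h2; exact hc ⟨h1.symm, h2.symm⟩
        simp only [hpre, Bool.false_eq_true, if_neg, not_false_iff]
        rw [ih (d :: t) (c :: acc) (by simp at h ⊢; omega)]
        simp [repU, hc]

theorem replace_eq_repU (s : List Char) :
    PySem.Chars.replace s ['_', '_'] ['_'] = repU s := by
  rw [PySem.Chars.replace]
  simp [replace_go_eq s.length s [] (le_refl _)]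

theorem repU_length_le (s : List Char) : (repU s).length ≤ s.length := by
  fun_induction repU <;> simp_all <;> omega

theorem repU_length_lt (s : List Char) (h : ['_', '_'] <:+: s) :
    (repU s).length < s.length := by
  fun_induction repU with
  | case1 => simp at h
  | case2 c =>
    exfalso
    obtain ⟨p, q, hpq⟩ := h
    have := congrArg List.length hpq; simp at this; omega
  | case3 c d t hcd ih =>
    obtain ⟨h1, h2⟩ := hcd; subst h1; subst h2
    have := repU_length_le t; simp; omega
  | case4 c d t hcd ih =>
    have h' : ['_', '_'] <:+: (d :: t) := by
      rcases (List.infix_cons_iff).mp h with h1 | h1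
      · exfalso
        obtain ⟨r, hr⟩ := h1
        simp only [List.cons_append, List.nil_append, List.cons.injEq] at hr
        exact hcd ⟨hr.1.symm, hr.2.1.symm⟩
      · exact h1
    have := ih h'; simp at this ⊢; omega

theorem replace_length_lt (s : List Char) (h : PySem.Chars.isIn ['_', '_'] s = true) :
    (PySem.Chars.replace s ['_', '_'] ['_']).length < s.length := by
  rw [replace_eq_repU]
  exact repU_length_lt s ((PySem.Chars.isIn_iff_infix _ _).mp h)

-- the fixed-point replace loop of A
def collapseA (s : List Char) : List Char :=
  if h : PySem.Chars.isIn ['_', '_'] s = true then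
    collapseA (PySem.Chars.replace s ['_', '_'] ['_'])
  else s
termination_by s.length
decreasing_by exact replace_length_lt s h

def sanitize_topic_part (value : String) : String :=
  let out : List Char := (PySem.Str.lower value).toList.foldl
    (fun acc ch =>
      if PySem.Chars.isalnum ch || ['_', '-'].contains ch then acc ++ [ch] else acc ++ ['_']) []
  String.mk (PySem.Chars.stripChars (collapseA out) ['_'])

-- ===== PORT B =====
-- _SANITIZE_TABLE covers exactly the code points 0..127; translate leaves other chars unchanged.
def sanitize_topic_part_alt (value : String) : String :=
  let mapped : List Char := (PySem.Str.lower value).toList.map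
    (fun c =>
      if c.toNat < 128 then
        (if PySem.Chars.isalnum c || ['_', '-'].contains c then c else '_')
      else c)
  String.mk (PySem.Chars.join ['_']
    ((PySem.Chars.splitOn mapped ['_']).filter (fun p => !p.isEmpty)))

-- ===== PRECONDITION & SPEC =====
def Spec_sanitize_topic_part (value : String) (out : String) : Prop := out = sanitize_topic_part_alt value
instance (value : String) (out : String) : Decidable (Spec_sanitize_topic_part value out) := by unfold Spec_sanitize_topic_part; infer_instance

-- ===== CLAIM (what is proved, stated in full; the proofs are below) =====
def Claim_equal_sanitize_topic_part : Prop := ∀ (value : String), Dom_sanitize_topic_part value → Spec_sanitize_topic_part value (sanitize_topic_part value)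

-- ===== LEMMAS AND PROOFS =====
-- squ: the canonical "collapse every run of underscores to one" function both programs compute.
def squ : List Char → List Char
  | [] => []
  | c :: t =>
    if c = '_' then '_' :: squ (t.dropWhile (· == '_')) else c :: squ t
termination_by s => s.length
decreasing_by
  · exact Nat.lt_succ_of_le (List.length_dropWhile_le _ _)
  · simp

theorem squ_repU (n : Nat) : ∀ s : List Char, s.length ≤ n →
    squ (repU s) = squ s ∧
      squ ((repU s).dropWhile (· == '_')) = squ (s.dropWhile (· == '_')) := by
  induction n with
  | zero =>
    intro s hs
    have : s = [] := by cases s <;> simp_all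
    subst this; exact ⟨rfl, rfl⟩
  | succ n ih =>
    intro s hs
    match s with
    | [] => exact ⟨rfl, rfl⟩
    | [c] =>
      constructor
      · rfl
      · simp [repU]
    | c :: d :: t =>
      by_cases hcd : c = '_' ∧ d = '_'
      · obtain ⟨h1, h2⟩ := hcd; subst h1; subst h2
        have hlen : t.length ≤ n := by simp at hs; omega
        constructor
        · -- squ (repU ('_' :: '_' :: t)) = squ ('_' :: '_' :: t)
          rw [show repU ('_' :: '_' :: t) = '_' :: repU t by simp [repU]]
          rw [squ, squ]
          simp only [if_pos rfl, List.dropWhile_cons, beq_self_eq_true, if_pos]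
          exact congrArg _ ((ih t hlen).2)
        · rw [show repU ('_' :: '_' :: t) = '_' :: repU t by simp [repU]]
          simp only [List.dropWhile_cons, beq_self_eq_true, if_pos]
          exact (ih t hlen).2
      · have hrep : repU (c :: d :: t) = c :: repU (d :: t) := by simp [repU, hcd]
        have hlen : (d :: t).length ≤ n := by simp at hs ⊢; omega
        by_cases hc : c = '_'
        · -- then d ≠ '_'
          have hd : ¬ d = '_' := fun hd => hcd ⟨hc, hd⟩
          subst hc
          have hrepd : repU (d :: t) = d :: repU t := by cases t <;> simp [repU, hd]
          constructor
          · rw [hrep, squ, squ]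
            simp only [if_pos rfl, List.dropWhile_cons, hrepd]
            simp only [show (d == '_') = false by simp [hd], Bool.false_eq_true, if_neg,
              not_false_iff]
            rw [← hrepd]
            exact congrArg _ ((ih (d :: t) hlen).1)
          · rw [hrep]
            simp only [List.dropWhile_cons, beq_self_eq_true, if_pos, hrepd]
            simp only [show (d == '_') = false by simp [hd], Bool.false_eq_true, if_neg,
              not_false_iff]
            rw [← hrepd]
            exact (ih (d :: t) hlen).1
        · constructor
          · rw [hrep, squ, squ]
            simp only [hc, if_neg, not_false_iff]
            exact congrArg _ ((ih (d :: t) hlen).1)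
          · rw [hrep]
            simp only [List.dropWhile_cons, show (c == '_') = false by simp [hc],
              Bool.false_eq_true, if_neg, not_false_iff]
            rw [squ, squ]
            simp only [hc, if_neg, not_false_iff]
            exact congrArg _ ((ih (d :: t) hlen).1)

theorem squ_of_no_double (n : Nat) : ∀ s : List Char, s.length ≤ n →
    ¬ ['_', '_'] <:+: s → squ s = s := by
  induction n with
  | zero =>
    intro s hs _
    have : s = [] := by cases s <;> simp_all
    subst this; simp [squ]
  | succ n ih =>
    intro s hs h
    match s with
    | [] => simp [squ]
    | c :: t =>
      have hlen : t.length ≤ n := by simp at hs; omega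
      have ht : ¬ ['_', '_'] <:+: t := fun hh => h (List.infix_cons_iff.mpr (Or.inr hh))
      by_cases hc : c = '_'
      · subst hc
        have hdw : t.dropWhile (· == '_') = t := by
          match t with
          | [] => rfl
          | d :: u =>
            have hd : ¬ d = '_' := by
              intro hd; subst hd
              exact h (List.infix_cons_iff.mpr (Or.inl ⟨u, rfl⟩))
            simp [List.dropWhile_cons, hd]
        rw [squ]
        simp only [if_pos rfl, hdw]
        simp [ih t hlen ht]
      · rw [squ]
        simp only [hc, if_neg, not_false_iff]
        rw [ih t hlen ht]

theorem collapseA_eq_squ (n : Nat) : ∀ s : List Char, s.length ≤ n → collapseA s = squ s := by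
  induction n with
  | zero =>
    intro s hs
    have : s = [] := by cases s <;> simp_all
    subst this; rw [collapseA]
    simp [show PySem.Chars.isIn ['_', '_'] ([] : List Char) = false from by decide, squ]
  | succ n ih =>
    intro s hs
    rw [collapseA]
    by_cases h : PySem.Chars.isIn ['_', '_'] s = true
    · simp only [h, if_pos]
      have hlt := replace_length_lt s h
      rw [ih _ (by omega)]
      rw [replace_eq_repU]
      exact (squ_repU s.length s (le_refl _)).1
    · simp only [h, if_neg, not_false_iff]
      exact (squ_of_no_double s.length s (le_refl _)
        ((PySem.Chars.isIn_eq_false_iff _ _).mp (by simp_all))).symm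

def fmap (ch : Char) : Char :=
  if PySem.Chars.isalnum ch || ['_', '-'].contains ch then ch else '_'

theorem foldA_eq (l : List Char) : ∀ acc : List Char,
    l.foldl (fun acc ch =>
        if PySem.Chars.isalnum ch || ['_', '-'].contains ch then acc ++ [ch] else acc ++ ['_'])
      acc = acc ++ l.map fmap := by
  induction l with
  | nil => intro acc; simp
  | cons c t ih =>
    intro acc
    simp only [List.foldl_cons, List.map_cons]
    by_cases hp : (PySem.Chars.isalnum c || ['_', '-'].contains c) = true
    · simp only [hp, if_pos, ih, fmap, List.append_assoc, List.singleton_append]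
    · simp only [hp, Bool.false_eq_true, if_neg, not_false_iff, ih, fmap,
        List.append_assoc, List.singleton_append]

theorem head?_dropWhile_not (l : List Char) (p : Char → Bool) (c : Char)
    (h : (l.dropWhile p).head? = some c) : ¬ p c := by
  induction l with
  | nil => simp [List.dropWhile] at h
  | cons a t ih =>
    rw [List.dropWhile_cons] at h
    split at h
    · exact ih h
    · simp at h; subst h; simp_all

-- spl m = (first part, remaining parts) of splitting m on the separator
def spl : List Char → List Char × List (List Char)
  | [] => ([], [])
  | c :: t => if c = '_' then ([], (spl t).1 :: (spl t).2) else (c :: (spl t).1, (spl t).2)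

theorem spl_us (t : List Char) : spl ('_' :: t) = ([], (spl t).1 :: (spl t).2) := by simp [spl]

theorem spl_cons (c : Char) (t : List Char) (hc : ¬ c = '_') :
    spl (c :: t) = (c :: (spl t).1, (spl t).2) := by simp [spl, hc]

theorem splitOn_go_eq (fuel : Nat) : ∀ (l cur acc : List Char) (accs : List (List Char)),
    l.length ≤ fuel →
    PySem.Chars.splitOn.go ['_'] fuel l cur accs
      = accs.reverse ++ (cur.reverse ++ (spl l).1) :: (spl l).2 := by
  induction fuel with
  | zero =>
    intro l cur acc accs h
    have : l = [] := by cases l <;> simp_all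
    subst this
    simp [PySem.Chars.splitOn.go, spl]
  | succ n ih =>
    intro l cur acc accs h
    match l with
    | [] => simp [PySem.Chars.splitOn.go, spl]
    | c :: t =>
      by_cases hc : c = '_'
      · subst hc
        rw [PySem.Chars.splitOn.go]
        simp only [List.isPrefixOf, beq_self_eq_true, Bool.and_self, if_pos]
        rw [show List.drop ['_'].length ('_' :: t) = t from rfl]
        rw [ih t [] acc (cur.reverse :: accs) (by simp at h; omega)]
        simp [spl]
      · rw [PySem.Chars.splitOn.go]
        have hpre : ['_'].isPrefixOf (c :: t) = false := by
          simp [List.isPrefixOf]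
          intro h1; exact hc h1.symm
        simp only [hpre, Bool.false_eq_true, if_neg, not_false_iff]
        rw [ih t (c :: cur) acc accs (by simp at h; omega)]
        simp [spl, hc]

theorem splitOn_eq_spl (m : List Char) :
    PySem.Chars.splitOn m ['_'] = (spl m).1 :: (spl m).2 := by
  rw [PySem.Chars.splitOn]
  rw [splitOn_go_eq (m.length + 1) m [] [] [] (by omega)]
  simp

-- the nonempty parts ("words") of m
def W (m : List Char) : List (List Char) :=
  ((spl m).1 :: (spl m).2).filter (fun p => !p.isEmpty)

theorem W_cons_us (t : List Char) : W ('_' :: t) = W t := by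
  simp [W, spl]

theorem W_cons (c : Char) (t : List Char) (hc : ¬ c = '_') :
    W (c :: t) = (c :: (spl t).1) :: (spl t).2.filter (fun p => !p.isEmpty) := by
  simp [W, spl, hc]

theorem all_us_of_W_nil (m : List Char) (h : W m = []) : ∀ c ∈ m, c = '_' := by
  induction m with
  | nil => simp
  | cons c t ih =>
    by_cases hc : c = '_'
    · subst hc
      rw [W_cons_us] at h
      simpa using ih h
    · rw [W_cons c t hc] at h
      simp at h
  
theorem W_nil_of_all_us (m : List Char) (h : ∀ c ∈ m, c = '_') : W m = [] := by
  induction m with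
  | nil => simp [W, spl]
  | cons c t ih =>
    have hc : c = '_' := h c (by simp)
    subst hc
    rw [W_cons_us]
    exact ih (fun d hd => h d (by simp [hd]))

theorem squ_all_us (m : List Char) (h : ∀ c ∈ m, c = '_') :
    squ m = if m = [] then [] else ['_'] := by
  cases m with
  | nil => simp [squ]
  | cons c t =>
    have hc : c = '_' := h c (by simp)
    subst hc
    rw [squ]
    simp only [if_pos rfl]
    have hdw : t.dropWhile (· == '_') = [] := by
      rw [List.dropWhile_eq_nil_iff]
      intro x hx; simp [h x (by simp [hx])]
    rw [hdw]
    simp [squ]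

theorem parts_no_us (m : List Char) :
    '_' ∉ (spl m).1 ∧ ∀ p ∈ (spl m).2, '_' ∉ p := by
  induction m with
  | nil => simp [spl]
  | cons c t ih =>
    by_cases hc : c = '_'
    · subst hc
      rw [spl_us]
      refine ⟨by simp, ?_⟩
      intro p hp
      rcases List.mem_cons.mp hp with hp | hp
      · subst hp; exact ih.1
      · exact ih.2 p hp
    · rw [spl_cons c t hc]
      refine ⟨?_, ih.2⟩
      intro h
      rcases List.mem_cons.mp h with h | h
      · exact hc h.symm
      · exact ih.1 h

theorem W_words (m : List Char) : ∀ p ∈ W m, p ≠ [] ∧ '_' ∉ p := by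
  intro p hp
  have h := List.of_mem_filter hp
  have hm := List.mem_of_mem_filter hp
  refine ⟨by simpa using h, ?_⟩
  simp only [List.mem_cons] at hm
  rcases hm with hm | hm
  · subst hm; exact (parts_no_us m).1
  · exact (parts_no_us m).2 p hm

theorem join_ne_nil (ws : List (List Char)) (hne : ws ≠ [])
    (hw : ∀ p ∈ ws, p ≠ []) : PySem.Chars.join ['_'] ws ≠ [] := by
  match ws with
  | [w] => simpa [PySem.Chars.join_singleton] using hw w (by simp)
  | w :: v :: rest =>
    rw [PySem.Chars.join_cons_cons]
    have := hw w (by simp)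
    cases w <;> simp_all

theorem join_head (w : List Char) (ws : List (List Char)) (hw : w ≠ []) :
    (PySem.Chars.join ['_'] (w :: ws)).head? = w.head? := by
  match ws with
  | [] => rw [PySem.Chars.join_singleton]
  | v :: rest =>
    rw [PySem.Chars.join_cons_cons, List.append_assoc, List.head?_append_of_ne_nil _ hw]

theorem join_cons (w : List Char) (ws : List (List Char)) :
    PySem.Chars.join ['_'] (w :: ws)
      = w ++ (if ws.isEmpty then [] else ['_'] ++ PySem.Chars.join ['_'] ws) := by
  cases ws with
  | nil => simp [PySem.Chars.join_singleton]
  | cons v rest => rw [PySem.Chars.join_cons_cons]; simp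

theorem join_getLast_ne (ws : List (List Char)) (hw : ∀ p ∈ ws, p ≠ [] ∧ '_' ∉ p) :
    ∀ c, (PySem.Chars.join ['_'] ws).getLast? = some c → c ≠ '_' := by
  induction ws with
  | nil => simp [PySem.Chars.join_nil]
  | cons w rest ih =>
    intro c hc
    match rest with
    | [] =>
      rw [PySem.Chars.join_singleton] at hc
      have := List.mem_of_getLast? hc
      intro hcu; subst hcu
      exact (hw w (by simp)).2 this
    | v :: rest' =>
      rw [PySem.Chars.join_cons_cons] at hc
      have hne : PySem.Chars.join ['_'] (v :: rest') ≠ [] :=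
        join_ne_nil _ (by simp) (fun p hp => (hw p (by simp [hp])).1)
      rw [show w ++ ['_'] ++ PySem.Chars.join ['_'] (v :: rest')
            = w ++ ('_' :: PySem.Chars.join ['_'] (v :: rest')) from by simp] at hc
      rw [List.getLast?_append_of_ne_nil _ (by simp : ('_' :: PySem.Chars.join ['_'] (v :: rest')) ≠ [])] at hc
      rw [show ('_' :: PySem.Chars.join ['_'] (v :: rest'))
            = ['_'] ++ PySem.Chars.join ['_'] (v :: rest') from rfl,
        List.getLast?_append_of_ne_nil _ hne] at hc
      exact ih (fun p hp => hw p (by simp [hp])) c hc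

theorem strip_cons_us (x : List Char) :
    PySem.Chars.stripChars ('_' :: x) ['_'] = PySem.Chars.stripChars x ['_'] := by
  simp [PySem.Chars.stripChars, List.dropWhile_cons]

theorem strip_append_us (x : List Char) :
    PySem.Chars.stripChars (x ++ ['_']) ['_'] = PySem.Chars.stripChars x ['_'] := by
  simp only [PySem.Chars.stripChars]
  by_cases h : x.dropWhile (fun c => ['_'].contains c) = []
  · rw [List.dropWhile_append, h]
    simp [List.dropWhile, h]
  · rw [List.dropWhile_append]
    simp only [List.isEmpty_iff, h, if_neg, not_false_iff]
    rw [List.reverse_append]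
    simp [List.dropWhile_cons]

theorem strip_of_ends (x : List Char)
    (hh : ∀ c, x.head? = some c → c ≠ '_') (hl : ∀ c, x.getLast? = some c → c ≠ '_') :
    PySem.Chars.stripChars x ['_'] = x := by
  simp only [PySem.Chars.stripChars]
  have h1 : x.dropWhile (fun c => ['_'].contains c) = x := by
    cases x with
    | nil => rfl
    | cons a t =>
      rw [List.dropWhile_cons]
      have := hh a rfl
      simp [this]
  rw [h1]
  have h2 : x.reverse.dropWhile (fun c => ['_'].contains c) = x.reverse := by
    cases hx : x.reverse with
    | nil => rfl
    | cons a t =>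
      rw [List.dropWhile_cons]
      have ha : x.getLast? = some a := by
        rw [← List.head?_reverse, hx]; rfl
      have := hl a ha
      simp [this]
  rw [h2, List.reverse_reverse]

theorem W_dropWhile (t : List Char) :
    W (t.dropWhile (· == '_')) = W t := by
  induction t with
  | nil => rfl
  | cons c u ih =>
    by_cases hc : c = '_'
    · subst hc
      rw [List.dropWhile_cons]
      simp only [beq_self_eq_true, if_pos, W_cons_us]
      exact ih
    · rw [List.dropWhile_cons]
      simp [hc]

theorem squ_decomp (n : Nat) : ∀ m : List Char, m.length ≤ n → W m ≠ [] →
    squ m = (if m.head? = some '_' then ['_'] else [])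
      ++ PySem.Chars.join ['_'] (W m)
      ++ (if m.getLast? = some '_' then ['_'] else []) := by
  induction n with
  | zero =>
    intro m hm hW
    have : m = [] := by cases m <;> simp_all
    subst this
    exact absurd (by simp [W, spl]) hW
  | succ n ih =>
    intro m hm hW
    match m with
    | [] => exact absurd (by simp [W, spl]) hW
    | c :: t =>
      by_cases hc : c = '_'
      · subst hc
        rw [W_cons_us] at hW ⊢
        -- t is not all underscores
        have hnall : ¬ ∀ d ∈ t, d = '_' := fun hall => hW (W_nil_of_all_us t hall)
        have hdwne : t.dropWhile (· == '_') ≠ [] := by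
          rw [Ne, List.dropWhile_eq_nil_iff]
          simpa using hnall
        have htne : t ≠ [] := by rintro rfl; simp at hnall
        rw [squ]
        simp only [if_pos rfl]
        have hlen : (t.dropWhile (· == '_')).length ≤ n := by
          have := List.length_dropWhile_le (· == '_') t
          simp at hm; omega
        rw [ih _ hlen (by rw [W_dropWhile]; exact hW), W_dropWhile]
        have hph : ¬ (t.dropWhile (· == '_')).head? = some '_' := by
          intro hsome
          have := head?_dropWhile_not t (· == '_') '_' hsome
          simp at this
        have hpl : (t.dropWhile (· == '_')).getLast? = t.getLast? := by
          conv_rhs => rw [← List.takeWhile_append_dropWhile (p := (· == '_')) (l := t)]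
          rw [List.getLast?_append_of_ne_nil _ hdwne]
        rw [hpl]
        simp only [hph, if_neg, not_false_iff, List.nil_append]
        have hgl : (('_' :: t).getLast? = t.getLast?) := by
          cases t with
          | nil => simp_all
          | cons a u => rw [List.getLast?_cons_cons]
        rw [hgl]
        simp
      · -- c ≠ '_', so c starts the first word
        have hlen : t.length ≤ n := by simp at hm; omega
        rw [squ]
        simp only [hc, if_neg, not_false_iff]
        simp only [show ¬ ((c :: t).head? = some '_') from by simp [hc], if_neg,
          not_false_iff, List.nil_append]
        cases t with
        | nil =>
          rw [show W [c] = [[c]] from by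
            simp only [W, spl, hc]
            simp [hc]]
          rw [PySem.Chars.join_singleton]
          simp [squ, hc]
        | cons d u =>
          rw [List.getLast?_cons_cons]
          by_cases hWt : W (d :: u) = []
          · -- d :: u is all underscores
            have hall := all_us_of_W_nil _ hWt
            have hd : d = '_' := hall d (by simp)
            subst hd
            rw [squ_all_us ('_' :: u) hall]
            simp only [reduceCtorEq, if_neg, not_false_iff]
            have hW1 : (spl ('_' :: u)).1 = [] := by rw [spl_us]
            have hfilt : ((spl ('_' :: u)).2).filter (fun p => !p.isEmpty) = [] := by
              have h0 := hWt
              simp only [W, hW1, List.filter_cons] at h0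
              simpa using h0
            rw [W_cons c _ hc, hW1, hfilt, PySem.Chars.join_singleton]
            have hlast : (('_' :: u) : List Char).getLast? = some '_' := by
              cases hgl2 : (('_' :: u) : List Char).getLast? with
              | none => simp at hgl2
              | some x => rw [hall x (List.mem_of_getLast? hgl2)]
            rw [hlast]
            simp
          · rw [ih (d :: u) hlen hWt]
            by_cases hd : d = '_'
            · subst hd
              have hWu : W u ≠ [] := by rw [← W_cons_us]; exact hWt
              obtain ⟨w, rest, hwr⟩ : ∃ w rest, W u = w :: rest := by
                cases hWu' : W u with
                | nil => exact absurd hWu' hWu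
                | cons w rest => exact ⟨w, rest, rfl⟩
              have hWm : W (c :: '_' :: u) = [c] :: W u := by
                rw [W_cons c _ hc, spl_us]
                rfl
              rw [hWm, W_cons_us, hwr, PySem.Chars.join_cons_cons]
              simp
            · have hWm : W (c :: d :: u) = (c :: d :: (spl u).1) ::
                  ((spl u).2).filter (fun p => !p.isEmpty) := by
                rw [W_cons c _ hc, spl_cons d u hd]
              rw [hWm, W_cons d u hd, join_cons, join_cons]
              simp [hd]

theorem stripsqu_eq_join (m : List Char) :
    PySem.Chars.stripChars (squ m) ['_']
      = PySem.Chars.join ['_'] ((PySem.Chars.splitOn m ['_']).filter (fun p => !p.isEmpty)) := by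
  rw [splitOn_eq_spl]
  rw [show ((spl m).1 :: (spl m).2).filter (fun p => !p.isEmpty) = W m from rfl]
  by_cases hW : W m = []
  · rw [squ_all_us m (all_us_of_W_nil m hW), hW, PySem.Chars.join_nil]
    split
    · simp [PySem.Chars.stripChars]
    · exact strip_cons_us [] |>.trans (by simp [PySem.Chars.stripChars])
  · rw [squ_decomp m.length m (le_refl _) hW]
    have hws := W_words m
    have hcore := strip_of_ends (PySem.Chars.join ['_'] (W m))
      (by
        intro c hcz
        obtain ⟨w, rest, hwr⟩ : ∃ w rest, W m = w :: rest := by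
          cases hWm : W m with
          | nil => exact absurd hWm hW
          | cons w rest => exact ⟨w, rest, rfl⟩
        rw [hwr] at hcz
        have hwne := (hws w (by rw [hwr]; simp)).1
        rw [join_head w rest hwne] at hcz
        have hcmem : c ∈ w := List.mem_of_mem_head? hcz
        intro hcu; subst hcu
        exact (hws w (by rw [hwr]; simp)).2 hcmem)
      (join_getLast_ne (W m) hws)
    split <;> split
    · rw [strip_append_us, List.singleton_append, strip_cons_us, hcore]
    · rw [List.append_nil, List.singleton_append, strip_cons_us, hcore]
    · rw [List.nil_append, strip_append_us, hcore]
    · rw [List.nil_append, List.append_nil, hcore]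

-- ===== VERDICT (by name: the statement is the Claim_ definition above) =====
theorem sanitize_topic_part_spec : Claim_equal_sanitize_topic_part := by
  intro value hdom
  unfold Spec_sanitize_topic_part sanitize_topic_part sanitize_topic_part_alt
  simp only []
  rw [foldA_eq, List.nil_append,
    collapseA_eq_squ ((PySem.Str.lower value).toList.map fmap).length _ (le_refl _)]
  have hmap : (PySem.Str.lower value).toList.map
      (fun c =>
        if c.toNat < 128 then
          (if PySem.Chars.isalnum c || ['_', '-'].contains c then c else '_')
        else c)
      = (PySem.Str.lower value).toList.map fmap := by
    apply List.map_congr_left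
    intro c hc
    have hlt : c.toNat < 128 := by
      have hc' : c ∈ PySem.Chars.lower value.toList := by simpa using hc
      simp only [PySem.Chars.lower, List.mem_map] at hc'
      obtain ⟨d, hd, rfl⟩ := hc'
      have hdom' : pvDomChar d = true := by
        unfold Dom_sanitize_topic_part pvDomStr at hdom
        exact List.all_eq_true.mp hdom d hd
      have hd126 : d.toNat ≤ 126 := by
        simp [pvDomChar] at hdom'
        omega
      by_cases hu : PySem.Chars.isupper d = true
      · have hb : d.toNat ≤ 90 := by
          have h1 : d ≤ 'Z' := by
            simp [PySem.Chars.isupper] at hu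
            exact hu.2
          exact UInt32.le_iff_toNat_le.mp (Char.le_def.mp h1)
        simp only [PySem.Chars.lowerChar, hu, if_pos]
        have hv : (d.toNat + 32).isValidChar := by left; omega
        have he : (Char.ofNat (d.toNat + 32)).toNat = d.toNat + 32 := by simp [Char.ofNat, hv]
        omega
      · simp only [PySem.Chars.lowerChar, hu, Bool.false_eq_true, if_neg, not_false_iff]
        omega
    simp only [hlt, if_pos, fmap]
  rw [hmap, stripsqu_eq_join]
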